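-- pv_equiv track=rewrite | github.com/Afroamir2/sideProjects | reductions.py | validateReduction
-- ===== SOURCE A (Python) =====
-- def reduceOne(firstString, secondString, wordList):
--     # Here is where you will write your function to determine
--     # if the second string can be reduced from the first string
--     # The code below checks the string in whether they exist in the worldList.
--     #It checkjs them independent of each other
--
--     string1 = False
--     string2 = False
--
--     for word in wordList:
--         if word == firstString:
--             string1 = True
--             break
--     for word in wordList:
--         if word == secondString:
--             string2 = True
--             break
--
--
--
--     # The Code below will check whether the first string can be reduced into the
--     # the second string.
--     if string1 == string2:
--         for i in range(len(firstString)):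
--             finalString = firstString[:i]+firstString[i+1:]
--             if finalString == secondString:
--                 return True
--
--     return False
--
--     pass
--
-- def validateReduction(reduction, wordList):
--     # Here is where you will write your function to determine
--     # whether or not the provided sequence is a valid one-letter
--     # reduction, checking for both the character removal and the
--     # validity of each word
--     Boolean = True
--     for i in range(len(reduction)):
--         if Boolean == True and i < len(reduction) -1:
--             if reduceOne(reduction[i], reduction[i+1], wordList) == True:
--                     Boolean = True
--             else:
--                 return False
--     return Boolean
-- ===== SOURCE B (Python) =====
-- def _isOneDeletion(a, b):
--     # True iff b is a with exactly one character deleted (two-pointer scan).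
--     if len(a) != len(b) + 1:
--         return False
--     i = 0
--     while i < len(b) and a[i] == b[i]:
--         i += 1
--     return a[i + 1:] == b[i:]
--
--
-- def validateReduction(reduction, wordList):
--     words = set(wordList)
--     for a, b in zip(reduction, reduction[1:]):
--         if (a in words) != (b in words):
--             return False
--         if not _isOneDeletion(a, b):
--             return False
--     return True
-- ===== Notes on version B (the rewrite author's own statement) =====
-- stated objective: alternative
-- what changed: B precomputes wordList membership as a set once and checks each adjacent pair with a single two-pointer one-deletion scan, instead of A's per-pair linear scans of wordList and per-pair construction of every one-char-removed copy of the word.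
import Mathlib
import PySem

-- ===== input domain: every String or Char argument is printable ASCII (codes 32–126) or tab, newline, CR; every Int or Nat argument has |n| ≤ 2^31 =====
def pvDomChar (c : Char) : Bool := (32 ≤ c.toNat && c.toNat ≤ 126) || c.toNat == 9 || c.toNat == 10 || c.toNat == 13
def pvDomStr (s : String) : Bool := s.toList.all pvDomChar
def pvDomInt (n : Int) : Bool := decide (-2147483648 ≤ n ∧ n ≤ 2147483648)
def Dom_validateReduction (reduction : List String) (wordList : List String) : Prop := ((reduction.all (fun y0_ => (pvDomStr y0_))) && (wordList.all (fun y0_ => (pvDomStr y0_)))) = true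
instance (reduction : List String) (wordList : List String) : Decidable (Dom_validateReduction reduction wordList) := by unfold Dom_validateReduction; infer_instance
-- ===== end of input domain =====

-- B replaces A's per-pair wordList scans and substring building by a precomputed membership set
-- and a two-pointer one-deletion scan per adjacent pair (objective: alternative algorithm).

-- ===== PORT A =====
-- A's first two loops: linear scan over wordList with break (sets stringN = True on first match)
def pvAMemLoop (target : String) : List String → Bool
  | [] => false
  | w :: ws => if w == target then true else pvAMemLoop target ws

-- A's inner loop: for i in range(len(firstString)): if first[:i]+first[i+1:] == second: return True
-- (strings handled as their char lists; Python slices ported exactly via PySem.List.slice)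
def pvADelLoop (la lb : List Char) : List Int → Bool
  | [] => false
  | i :: rest =>
      if (PySem.List.slice la none (some i) ++ PySem.List.slice la (some (i + 1)) none) == lb then true
      else pvADelLoop la lb rest

def reduceOne (firstString secondString : String) (wordList : List String) : Bool :=
  let string1 := pvAMemLoop firstString wordList
  let string2 := pvAMemLoop secondString wordList
  if string1 == string2 then
    pvADelLoop firstString.toList secondString.toList
      (PySem.List.pyRange 0 (firstString.toList.length : Int) 1)
  else false

-- A's outer loop: for i in range(len(reduction)) with Boolean carried as state and early return False
def pvALoop (reduction wordList : List String) (boolean : Bool) : List Int → Bool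
  | [] => boolean
  | i :: rest =>
      if boolean == true && i < (reduction.length : Int) - 1 then
        if reduceOne (PySem.List.pyGetD reduction i "") (PySem.List.pyGetD reduction (i + 1) "") wordList == true then
          pvALoop reduction wordList true rest
        else false
      else pvALoop reduction wordList boolean rest

def validateReduction (reduction : List String) (wordList : List String) : Bool :=
  pvALoop reduction wordList true (PySem.List.pyRange 0 (reduction.length : Int) 1)

-- ===== PORT B =====
-- two-pointer scan: advance while chars agree (while i < len(b) and a[i] == b[i]), then a[i+1:] == b[i:]
-- (called only with |a| = |b| + 1, so the [] / _::_ case is unreachable; ported as False)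
def pvBScan : List Char → List Char → Bool
  | a, [] => a.drop 1 == ([] : List Char)
  | [], _ :: _ => false
  | x :: xs, y :: ys => if x == y then pvBScan xs ys else xs == y :: ys

def pvBIsOneDeletion (a b : String) : Bool :=
  if a.toList.length == b.toList.length + 1 then pvBScan a.toList b.toList else false

def pvBPair (words : PySem.Set String) (a b : String) : Bool :=
  (PySem.Set.contains words a == PySem.Set.contains words b) && pvBIsOneDeletion a b

def validateReduction_alt (reduction : List String) (wordList : List String) : Bool :=
  let words : PySem.Set String := PySem.Set.ofList wordList
  (reduction.zip reduction.tail).all (fun p => pvBPair words p.1 p.2)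

-- ===== PRECONDITION & SPEC =====
def Spec_validateReduction (reduction : List String) (wordList : List String) (out : Bool) : Prop := out = validateReduction_alt reduction wordList
instance (reduction : List String) (wordList : List String) (out : Bool) : Decidable (Spec_validateReduction reduction wordList out) := by unfold Spec_validateReduction; infer_instance

-- ===== CLAIM (what is proved, stated in full; the proofs are below) =====
def Claim_equal_validateReduction : Prop := ∀ (reduction : List String) (wordList : List String), Dom_validateReduction reduction wordList → Spec_validateReduction reduction wordList (validateReduction reduction wordList)

-- ===== LEMMAS AND PROOFS =====

theorem pvAMemLoop_eq (t : String) (l : List String) : pvAMemLoop t l = l.contains t := by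
  induction l with
  | nil => rfl
  | cons w ws ih =>
      simp only [pvAMemLoop, List.contains_cons]
      by_cases h : w = t
      · subst h; simp
      · have h1 : (w == t) = false := beq_eq_false_iff_ne.2 h
        have h2 : (t == w) = false := beq_eq_false_iff_ne.2 (Ne.symm h)
        simp [h1, h2, ih]

theorem set_contains_ofList (wl : List String) (t : String) :
    PySem.Set.contains (PySem.Set.ofList wl) t = wl.contains t := by
  by_cases h : t ∈ wl
  · rw [(PySem.Set.contains_iff _ _).2 ((PySem.Set.mem_ofList _ _).2 h),
      List.contains_iff_mem.2 h]
  · have h1 : ¬ PySem.Set.contains (PySem.Set.ofList wl) t = true :=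
      fun hc => h ((PySem.Set.mem_ofList _ _).1 ((PySem.Set.contains_iff _ _).1 hc))
    have h2 : ¬ wl.contains t = true := fun hc => h (List.contains_iff_mem.1 hc)
    rw [Bool.eq_false_iff.2 h1, Bool.eq_false_iff.2 h2]

theorem pvADelLoop_any (la lb : List Char) (l : List Int) :
    pvADelLoop la lb l =
      l.any (fun i => (PySem.List.slice la none (some i) ++ PySem.List.slice la (some (i + 1)) none) == lb) := by
  induction l with
  | nil => rfl
  | cons i rest ih =>
      simp only [pvADelLoop, List.any_cons]
      split <;> simp_all

theorem pvADel_eq_range (la lb : List Char) :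
    pvADelLoop la lb (PySem.List.pyRange 0 (la.length : Int) 1) =
      (List.range la.length).any (fun i => (la.take i ++ la.drop (i + 1)) == lb) := by
  rw [pvADelLoop_any, PySem.List.pyRange_one]
  simp only [Int.sub_zero, Int.toNat_natCast, List.any_map]
  congr 1
  funext i
  simp only [Function.comp_apply, zero_add]
  rw [PySem.List.slice_to_natCast]
  have h : (i : Int) + 1 = ((i + 1 : Nat) : Int) := by push_cast; ring
  rw [h, PySem.List.slice_from_natCast]

-- the key characterisation: A's brute-force deletion search equals B's two-pointer scan
theorem scan_iff (lb : List Char) : ∀ (la : List Char), la.length = lb.length + 1 →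
    ((∃ i, i < la.length ∧ la.take i ++ la.drop (i + 1) = lb) ↔ pvBScan la lb = true) := by
  induction lb with
  | nil =>
      intro la hl
      match la, hl with
      | [x], _ =>
          constructor
          · intro _; rfl
          · intro _; exact ⟨0, by omega, rfl⟩
  | cons y ys ih =>
      intro la hl
      match la, hl with
      | x :: xs, hl =>
          have hxs : xs.length = ys.length + 1 := by simpa using hl
          by_cases hxy : x = y
          · subst hxy
            have hs : pvBScan (x :: xs) (x :: ys) = pvBScan xs ys := by simp [pvBScan]
            rw [hs, ← ih xs hxs]
            constructor
            · rintro ⟨i, hi, he⟩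
              cases i with
              | zero =>
                  simp only [List.take_zero, List.drop_succ_cons, List.drop_zero,
                    List.nil_append] at he
                  exact ⟨0, by simp [he], by simp [he]⟩
              | succ j =>
                  simp only [List.take_succ_cons, List.drop_succ_cons, List.cons_append,
                    List.cons.injEq] at he
                  exact ⟨j, by simp only [List.length_cons] at hi; omega, he.2⟩
            · rintro ⟨j, hj, he⟩
              exact ⟨j + 1, by simp only [List.length_cons]; omega, by simp [he]⟩
          · have hbeq : (x == y) = false := beq_eq_false_iff_ne.2 hxy
            constructor
            · rintro ⟨i, hi, he⟩
              cases i with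
              | zero =>
                  simp only [List.take_zero, List.drop_succ_cons, List.drop_zero,
                    List.nil_append] at he
                  simp [pvBScan, hbeq, he]
              | succ j =>
                  simp only [List.take_succ_cons, List.drop_succ_cons, List.cons_append,
                    List.cons.injEq] at he
                  exact absurd he.1 hxy
            · intro hsc
              have hx : xs = y :: ys := by simpa [pvBScan, hbeq] using hsc
              exact ⟨0, by simp, by simp [hx]⟩

theorem del_length_ne (la lb : List Char) (h : la.length ≠ lb.length + 1) :
    (List.range la.length).any (fun i => (la.take i ++ la.drop (i + 1)) == lb) = false := by
  rw [List.any_eq_false]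
  intro i hi
  rw [List.mem_range] at hi
  intro he
  apply h
  have hc := congrArg List.length (beq_iff_eq.1 he)
  simp only [List.length_append, List.length_take, List.length_drop] at hc
  omega

theorem reduceOne_eq_pair (a b : String) (wl : List String) :
    reduceOne a b wl = pvBPair (PySem.Set.ofList wl) a b := by
  unfold reduceOne pvBPair
  rw [pvAMemLoop_eq, pvAMemLoop_eq, set_contains_ofList, set_contains_ofList]
  by_cases hm : (wl.contains a == wl.contains b) = true
  · rw [if_pos hm, hm, Bool.true_and, pvADel_eq_range]
    unfold pvBIsOneDeletion
    by_cases hl : a.toList.length = b.toList.length + 1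
    · rw [if_pos (beq_iff_eq.2 hl)]
      have hiff := scan_iff b.toList a.toList hl
      rcases hsc : pvBScan a.toList b.toList with _ | _
      · rw [List.any_eq_false]
        intro i hi
        rw [List.mem_range] at hi
        intro he
        have ht : pvBScan a.toList b.toList = true := hiff.1 ⟨i, hi, beq_iff_eq.1 he⟩
        rw [hsc] at ht
        exact Bool.false_ne_true ht
      · rw [List.any_eq_true]
        obtain ⟨i, hi, he⟩ := hiff.2 hsc
        exact ⟨i, List.mem_range.2 hi, beq_iff_eq.2 he⟩
    · rw [if_neg (fun hc => hl (beq_iff_eq.1 hc)), del_length_ne _ _ hl]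
  · rw [if_neg hm, Bool.eq_false_iff.2 hm, Bool.false_and]

theorem pvALoop_eq (wl red : List String) : ∀ (t : List String) (k : Nat), red.drop k = t →
    pvALoop red wl true (PySem.List.pyRange (k : Int) (red.length : Int) 1) =
      (t.zip t.tail).all (fun p => pvBPair (PySem.Set.ofList wl) p.1 p.2) := by
  intro t
  induction t with
  | nil =>
      intro k hk
      have hge : red.length ≤ k := by
        have hc := congrArg List.length hk
        simp only [List.length_drop, List.length_nil] at hc
        omega
      rw [PySem.List.pyRange_one_eq_nil (by exact_mod_cast hge)]
      rfl
  | cons a rest ih =>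
      intro k hk
      have hlen : red.length - k = rest.length + 1 := by
        have hc := congrArg List.length hk
        simp only [List.length_drop, List.length_cons] at hc
        omega
      have hklt : k < red.length := by omega
      have hga : PySem.List.pyGetD red (k : Int) "" = a := by
        rw [PySem.List.pyGetD_natCast]
        have hh : red[k]? = some a := by
          rw [← List.head?_drop, hk]; rfl
        simp [List.getD_eq_getElem?_getD, hh]
      have hdropk1 : red.drop (k + 1) = rest := by
        have hd : red.drop (k + 1) = (red.drop k).tail := by
          rw [← List.drop_drop]; simp
        rw [hd, hk]; rfl
      have hcast : ((k : Int) + 1) = ((k + 1 : Nat) : Int) := by push_cast; ring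
      rw [PySem.List.pyRange_one_cons (by exact_mod_cast hklt)]
      cases rest with
      | nil =>
          have hk1 : red.length = k + 1 := by
            simp only [List.length_nil] at hlen; omega
          have hcond : ¬ ((k : Int) < (red.length : Int) - 1) := by omega
          simp only [pvALoop, BEq.rfl, Bool.true_and]
          rw [if_neg (by simpa using hcond), hcast, ih (k + 1) hdropk1]
          rfl
      | cons b0 rest' =>
          have hk2 : k + 2 ≤ red.length := by
            simp only [List.length_cons] at hlen; omega
          have hcond : ((k : Int) < (red.length : Int) - 1) := by omega
          have hgb : PySem.List.pyGetD red ((k : Int) + 1) "" = b0 := by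
            rw [hcast, PySem.List.pyGetD_natCast]
            have hh : red[k + 1]? = some b0 := by
              rw [← List.head?_drop, hdropk1]; rfl
            simp [List.getD_eq_getElem?_getD, hh]
          simp only [pvALoop, BEq.rfl, Bool.true_and]
          rw [if_pos (by simpa using hcond), hga, hgb, reduceOne_eq_pair]
          rcases hp : pvBPair (PySem.Set.ofList wl) a b0 with _ | _
          · rw [if_neg (by simp)]
            simp [List.all_cons, hp]
          · rw [if_pos (by simp), hcast, ih (k + 1) hdropk1]
            simp [List.all_cons, hp]

-- ===== VERDICT (by name: the statement is the Claim_ definition above) =====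
theorem validateReduction_spec : Claim_equal_validateReduction := by
  intro reduction wordList _
  unfold Spec_validateReduction validateReduction validateReduction_alt
  have h := pvALoop_eq wordList reduction reduction 0 (by simp)
  simpa using h
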